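-- pv_equiv track=rewrite | github.com/natevitz6/K-in-a-Row | natevitz_KInARow.py | extract_all_lines
-- ===== SOURCE A (Python) =====
-- def extract_all_lines(board, k):
--     rows, cols = len(board), len(board[0])
--
--     def get_diagonals(reverse=False):
--         diags = []
--         for offset in range(-rows + 1, cols):
--             diag = [board[i][i + offset] if reverse else board[i][cols - 1 - i - offset]
--                     for i in range(max(0, -offset), min(rows, cols - offset))]
--             if len(diag) >= k:
--                 diags.append(diag)
--         return diags
--
--     return (
--         board +  # rows
--         list(map(list, zip(*board))) +  # columns
--         get_diagonals() +  # forward diagonals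
--         get_diagonals(reverse=True)  # backward diagonals
--     )
-- ===== SOURCE B (Python) =====
-- def extract_all_lines(board, k):
--     rows, cols = len(board), len(board[0])
--     columns = list(map(list, zip(*board)))
--     n = rows + cols - 1
--     anti = [[] for _ in range(n)]   # bucket i+j: anti-diagonals
--     main = [[] for _ in range(n)]   # bucket j-i+rows-1: main diagonals
--     for i in range(rows):
--         for j in range(cols):
--             v = board[i][j]
--             anti[i + j].append(v)
--             main[j - i + rows - 1].append(v)
--     fwd = [d for d in reversed(anti) if len(d) >= k]
--     bwd = [d for d in main if len(d) >= k]
--     return board + columns + fwd + bwd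
-- ===== Notes on version B (the rewrite author's own statement) =====
-- stated objective: alternative
-- what changed: Replaces A's per-offset diagonal loops (one index-computed comprehension per offset, run twice) by a single row-major pass over all cells that appends each cell into two bucket arrays keyed by i+j and j-i+rows-1, then emits anti-diagonal buckets in reverse and main-diagonal buckets in order, filtered by length >= k.
import Mathlib
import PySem

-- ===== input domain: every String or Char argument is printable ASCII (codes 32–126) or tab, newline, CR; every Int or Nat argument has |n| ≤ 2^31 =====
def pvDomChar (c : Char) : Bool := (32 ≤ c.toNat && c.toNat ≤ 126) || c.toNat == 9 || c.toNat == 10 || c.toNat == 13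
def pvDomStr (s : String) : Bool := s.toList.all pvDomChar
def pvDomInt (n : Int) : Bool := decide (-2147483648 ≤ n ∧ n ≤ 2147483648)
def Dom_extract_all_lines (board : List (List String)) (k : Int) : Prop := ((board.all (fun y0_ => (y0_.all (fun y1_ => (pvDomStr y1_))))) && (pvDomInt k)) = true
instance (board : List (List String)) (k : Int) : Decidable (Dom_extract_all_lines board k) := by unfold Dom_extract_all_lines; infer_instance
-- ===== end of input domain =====

-- B replaces A's per-offset diagonal comprehensions by one row-major pass that buckets every
-- cell by i+j (anti-diagonals) and j-i+rows-1 (main diagonals); same cost, different traversal.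


-- ===== PORT A =====
-- exact port of list(map(list, zip(*board))): zip truncates to the shortest row
def pvZipStar (board : List (List String)) : List (List String) :=
  (List.range (((board.map List.length).min?).getD 0)).map
    (fun j => board.map (fun row => row.getD j ""))

-- the list comprehension 'diag' of A, for one offset; cell accesses via pyGetD (in range under Pre_)
def pvDiag (board : List (List String)) (rows cols offset : Int) (reverse : Bool) : List String :=
  (PySem.List.pyRange (max 0 (-offset)) (min rows (cols - offset)) 1).map (fun i =>
    if reverse then PySem.List.pyGetD (PySem.List.pyGetD board i []) (i + offset) ""
    else PySem.List.pyGetD (PySem.List.pyGetD board i []) (cols - 1 - i - offset) "")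

def pvGetDiagonals (board : List (List String)) (k rows cols : Int) (reverse : Bool) :
    List (List String) :=
  (PySem.List.pyRange (-rows + 1) cols 1).foldl (fun diags offset =>
    let diag := pvDiag board rows cols offset reverse
    if k ≤ (diag.length : Int) then diags ++ [diag] else diags) []

def extract_all_lines (board : List (List String)) (k : Int) : List (List String) :=
  let rows : Int := board.length
  let cols : Int := (PySem.List.pyGetD board 0 []).length
  board ++ pvZipStar board ++ pvGetDiagonals board k rows cols false
        ++ pvGetDiagonals board k rows cols true

-- ===== PORT B =====
-- anti[n].append(v): exact when 0 ≤ n < len(l) (always the case for the keys B computes)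
def pvBump (l : List (List String)) (n : Int) (v : String) : List (List String) :=
  l.set n.toNat (l.getD n.toNat [] ++ [v])

def extract_all_lines_alt (board : List (List String)) (k : Int) : List (List String) :=
  let rows : Int := board.length
  let cols : Int := (PySem.List.pyGetD board 0 []).length
  let columns := pvZipStar board
  let n : Int := rows + cols - 1
  let init : List (List String) := (List.range n.toNat).map (fun _ => ([] : List String))
  let st := (PySem.List.pyRange 0 rows 1).foldl (fun st i =>
      (PySem.List.pyRange 0 cols 1).foldl (fun st2 j =>
        let v := PySem.List.pyGetD (PySem.List.pyGetD board i []) j ""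
        (pvBump st2.1 (i + j) v, pvBump st2.2 (j - i + rows - 1) v)) st)
    (init, init)
  let fwd := st.1.reverse.filter (fun d => k ≤ (d.length : Int))
  let bwd := st.2.filter (fun d => k ≤ (d.length : Int))
  board ++ columns ++ fwd ++ bwd

-- ===== PRECONDITION & SPEC =====
-- Pre_ is exactly where the Python A returns normally: a nonempty board whose rows are all at
-- least as long as the first row; otherwise board[0] or a diagonal cell access raises IndexError
-- (and B's Python raises IndexError on exactly the same inputs).
def Pre_extract_all_lines (board : List (List String)) (k : Int) : Prop :=
  board ≠ [] ∧ ∀ row ∈ board, (board.headD []).length ≤ row.length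
instance (board : List (List String)) (k : Int) : Decidable (Pre_extract_all_lines board k) := by
  unfold Pre_extract_all_lines; infer_instance

def pvWitness_extract_all_lines : List (List String) × Int := ([["a", "b"], ["c", "d"]], 2)

def Spec_extract_all_lines (board : List (List String)) (k : Int) (out : List (List String)) : Prop := out = extract_all_lines_alt board k
instance (board : List (List String)) (k : Int) (out : List (List String)) : Decidable (Spec_extract_all_lines board k out) := by unfold Spec_extract_all_lines; infer_instance

-- ===== CLAIM (what is proved, stated in full; the proofs are below) =====
def Claim_equal_extract_all_lines : Prop := ∀ (board : List (List String)) (k : Int), Dom_extract_all_lines board k → Pre_extract_all_lines board k → Spec_extract_all_lines board k (extract_all_lines board k)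

-- ===== LEMMAS AND PROOFS =====

theorem pvBump_getD (l : List (List String)) (n : Int) (v : String)
    (hn : 0 ≤ n) (hlt : n < l.length) (t : Nat) (ht : t < l.length) :
    (pvBump l n v).getD t [] = if (t : Int) = n then l.getD t [] ++ [v] else l.getD t [] := by
  have hnt : n.toNat < l.length := by omega
  simp only [pvBump, List.getD, List.getElem?_set]
  split_ifs with h1 h2 h3 <;> simp_all <;> omega

theorem pvFold_bump_length {β : Type} (xs : List β) (idx : β → Int) (val : β → String)
    (l : List (List String)) :
    (xs.foldl (fun a x => pvBump a (idx x) (val x)) l).length = l.length := by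
  induction xs generalizing l with
  | nil => rfl
  | cons q rest ih => simp only [List.foldl_cons]; rw [ih]; simp [pvBump]

-- one inner loop of B's pass (one row), bucket-wise
theorem pvRow_getD (cell : Int → String) (c : Int) (a b : Int) (l : List (List String))
    (hin : ∀ j : Int, a ≤ j → j < b → 0 ≤ c + j ∧ c + j < l.length)
    (t : Nat) (ht : t < l.length) :
    ((PySem.List.pyRange a b 1).foldl (fun acc j => pvBump acc (c + j) (cell j)) l).getD t []
      = l.getD t [] ++
        (if a ≤ (t : Int) - c ∧ (t : Int) - c < b then [cell ((t : Int) - c)] else []) := by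
  generalize hn : (b - a).toNat = n
  induction n generalizing a l with
  | zero =>
    rw [PySem.List.pyRange_one_eq_nil (by omega)]
    rw [if_neg (by omega)]
    simp
  | succ n ih =>
    have hab : a < b := by omega
    rw [PySem.List.pyRange_one_cons hab]
    simp only [List.foldl_cons]
    have hb := hin a le_rfl hab
    have hlen : (pvBump l (c + a) (cell a)).length = l.length := by simp [pvBump]
    rw [ih (a + 1) (pvBump l (c + a) (cell a))
        (fun j h1 h2 => by rw [hlen]; exact hin j (by omega) h2) (by omega) (by omega),
      pvBump_getD l (c + a) (cell a) hb.1 hb.2 t ht]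
    by_cases h1 : (t : Int) = c + a
    · rw [if_pos h1, if_neg (by omega), if_pos (by omega)]
      have e : (t : Int) - c = a := by omega
      rw [e]
      simp
    · rw [if_neg h1]
      by_cases h2 : a + 1 ≤ (t : Int) - c ∧ (t : Int) - c < b
      · rw [if_pos h2, if_pos (by omega)]
      · rw [if_neg h2, if_neg (by omega)]

theorem pvRow_length (cell : Int → String) (c : Int) (a b : Int) (l : List (List String)) :
    ((PySem.List.pyRange a b 1).foldl (fun acc j => pvBump acc (c + j) (cell j)) l).length
      = l.length :=
  pvFold_bump_length _ (fun j => c + j) cell l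

-- B's whole pass for one bucket family, bucket-wise
theorem pvBoard_length (key : Int → Int) (cell : Int → Int → String) (C : Int) (a b : Int)
    (l : List (List String)) :
    ((PySem.List.pyRange a b 1).foldl (fun acc i =>
        (PySem.List.pyRange 0 C 1).foldl (fun a2 j => pvBump a2 (key i + j) (cell i j)) acc)
      l).length = l.length := by
  generalize hn : (b - a).toNat = n
  induction n generalizing a l with
  | zero => rw [PySem.List.pyRange_one_eq_nil (a := a) (b := b) (by omega)]; rfl
  | succ n ih =>
    have hab : a < b := by omega
    rw [PySem.List.pyRange_one_cons (a := a) (b := b) hab]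
    simp only [List.foldl_cons]
    rw [ih (a + 1) _ (by omega), pvRow_length]

theorem pvBoard_getD (key : Int → Int) (cell : Int → Int → String) (C : Int) (a b : Int)
    (l : List (List String))
    (hin : ∀ i : Int, a ≤ i → i < b → ∀ j : Int, 0 ≤ j → j < C →
      0 ≤ key i + j ∧ key i + j < l.length)
    (t : Nat) (ht : t < l.length) :
    ((PySem.List.pyRange a b 1).foldl (fun acc i =>
        (PySem.List.pyRange 0 C 1).foldl (fun a2 j => pvBump a2 (key i + j) (cell i j)) acc)
      l).getD t []
      = l.getD t [] ++ (PySem.List.pyRange a b 1).flatMap (fun i =>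
          if 0 ≤ (t : Int) - key i ∧ (t : Int) - key i < C
          then [cell i ((t : Int) - key i)] else []) := by
  generalize hn : (b - a).toNat = n
  induction n generalizing a l with
  | zero =>
    rw [PySem.List.pyRange_one_eq_nil (a := a) (b := b) (by omega)]
    simp
  | succ n ih =>
    have hab : a < b := by omega
    rw [PySem.List.pyRange_one_cons (a := a) (b := b) hab]
    simp only [List.foldl_cons, List.flatMap_cons]
    have hlen1 : ((PySem.List.pyRange 0 C 1).foldl
        (fun a2 j => pvBump a2 (key a + j) (cell a j)) l).length = l.length :=
      pvRow_length (cell a) (key a) 0 C l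
    rw [ih (a + 1) _ (fun i h1 h2 j h3 h4 => by
        rw [hlen1]; exact hin i (by omega) h2 j h3 h4) (by omega) (by omega),
      pvRow_getD (cell a) (key a) 0 C l (fun j h1 h2 => hin a le_rfl hab j h1 h2) t ht]
    simp only [List.append_assoc]

theorem range_flatMap_interval {α : Type} (R lo hi : Nat) (h : hi ≤ R) (f : Nat → α)
    (p : Nat → Prop) [DecidablePred p] (hp : ∀ i, i < R → (p i ↔ lo ≤ i ∧ i < hi)) :
    (List.range R).flatMap (fun i => if p i then [f i] else [])
      = (List.range (hi - lo)).map (fun m => f (lo + m)) := by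
  induction R generalizing hi with
  | zero =>
    have : hi = 0 := by omega
    subst this
    simp
  | succ R ih =>
    rw [List.range_succ, List.flatMap_append]
    by_cases hhi : hi ≤ R
    · rw [ih hi hhi (fun i hi2 => hp i (by omega))]
      have : ¬ p R := by rw [hp R (by omega)]; omega
      simp [this]
    · have hEq : hi = R + 1 := by omega
      subst hEq
      by_cases hlo : lo ≤ R
      · have hpR : p R := by rw [hp R (by omega)]; omega
        rw [ih R le_rfl (fun i hi2 => by rw [hp i (by omega)]; omega)]
        have e : R + 1 - lo = (R - lo) + 1 := by omega
        rw [e, List.range_succ, List.map_append]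
        simp [hpR, Nat.add_sub_cancel' hlo]
      · have e : R + 1 - lo = 0 := by omega
        rw [e]
        have hnone : ∀ i, i < R + 1 → ¬ p i := fun i h2 => by rw [hp i h2]; omega
        simp only [List.range_zero, List.map_nil]
        have h1 : List.flatMap (fun i => if p i then [f i] else []) (List.range R) = [] :=
          List.flatMap_eq_nil_iff.mpr (fun x hx => by simp [hnone x (by simp at hx; omega)])
        rw [h1]
        simp [hnone R (by omega)]

-- B's anti-diagonal bucket t is A's forward diagonal for offset cols-1-t
theorem anti_bucket (board : List (List String)) (R C : Nat) (t : Nat) :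
    (PySem.List.pyRange 0 (R : Int) 1).flatMap (fun i =>
        if 0 ≤ (t : Int) - i ∧ (t : Int) - i < (C : Int)
        then [PySem.List.pyGetD (PySem.List.pyGetD board i []) ((t : Int) - i) ""] else [])
      = pvDiag board R C ((C : Int) - 1 - t) false := by
  rw [PySem.List.pyRange_one, List.flatMap_map]
  have hcast : ((R : Int) - 0).toNat = R := by omega
  rw [hcast]
  rw [range_flatMap_interval R (t + 1 - C) (min R (t + 1)) (by omega)
      (fun i => PySem.List.pyGetD (PySem.List.pyGetD board ((0 : Int) + i) [])
        ((t : Int) - ((0 : Int) + i)) "")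
      _ (fun i hi => by omega)]
  rw [pvDiag, PySem.List.pyRange_one, List.map_map]
  have hlen : ((min (R : Int) (C - ((C : Int) - 1 - t)) - max 0 (-((C : Int) - 1 - t)))).toNat
      = min R (t + 1) - (t + 1 - C) := by omega
  rw [hlen]
  apply List.map_congr_left
  intro m hm
  simp only [List.mem_range] at hm
  simp only [Function.comp]
  rw [if_neg (by simp)]
  have hrow : (max 0 (-((C : Int) - 1 - t)) + (m : Int))
      = ((0 : Int) + ((t + 1 - C + m : Nat) : Int)) := by omega
  rw [hrow]
  congr 1
  omega

-- B's main-diagonal bucket t is A's backward diagonal for offset t-(rows-1)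
theorem main_bucket (board : List (List String)) (R C : Nat) (t : Nat) :
    (PySem.List.pyRange 0 (R : Int) 1).flatMap (fun i =>
        if 0 ≤ (t : Int) - ((R : Int) - 1 - i) ∧ (t : Int) - ((R : Int) - 1 - i) < (C : Int)
        then [PySem.List.pyGetD (PySem.List.pyGetD board i [])
          ((t : Int) - ((R : Int) - 1 - i)) ""] else [])
      = pvDiag board R C ((t : Int) - ((R : Int) - 1)) true := by
  rw [PySem.List.pyRange_one, List.flatMap_map]
  have hcast : ((R : Int) - 0).toNat = R := by omega
  rw [hcast]
  rw [range_flatMap_interval R (R - 1 - t) (min R (C + R - 1 - t)) (by omega)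
      (fun i => PySem.List.pyGetD (PySem.List.pyGetD board ((0 : Int) + i) [])
        ((t : Int) - ((R : Int) - 1 - ((0 : Int) + i))) "")
      _ (fun i hi => by omega)]
  rw [pvDiag, PySem.List.pyRange_one, List.map_map]
  have hlen : ((min (R : Int) (C - ((t : Int) - ((R : Int) - 1)))
      - max 0 (-((t : Int) - ((R : Int) - 1))))).toNat
      = min R (C + R - 1 - t) - (R - 1 - t) := by omega
  rw [hlen]
  apply List.map_congr_left
  intro m hm
  simp only [List.mem_range] at hm
  simp only [Function.comp]
  rw [if_pos trivial]
  have hrow : (max 0 (-((t : Int) - ((R : Int) - 1))) + (m : Int))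
      = ((0 : Int) + ((R - 1 - t + m : Nat) : Int)) := by omega
  rw [hrow]
  congr 1
  omega

-- ===== VERDICT (by name: the statement is the Claim_ definition above) =====
theorem extract_all_lines_spec : Claim_equal_extract_all_lines := by
  intro board k _dom _hpre
  unfold Spec_extract_all_lines extract_all_lines extract_all_lines_alt
  dsimp only
  set R : Nat := board.length with hRdef
  set C : Nat := (PySem.List.pyGetD board 0 []).length with hCdef
  set N : Nat := R + C - 1 with hNdef
  have hN : ((R : Int) + (C : Int) - 1).toNat = N := by omega
  rw [hN]
  set init : List (List String) := (List.range N).map (fun _ => ([] : List String)) with hinitdef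
  have hinitlen : init.length = N := by simp [hinitdef]
  have hinitget : ∀ t : Nat, init.getD t [] = ([] : List String) := by
    intro t
    simp only [hinitdef, List.getD]
    rcases h : ((List.range N).map (fun _ => ([] : List String)))[t]? with _ | v
    · rfl
    · simp only [List.getElem?_map] at h
      rcases h2 : (List.range N)[t]? with _ | u
      · rw [h2] at h; simp at h
      · rw [h2] at h; simp at h; simp [← h]
  set cellF : Int → Int → String :=
    (fun i j => PySem.List.pyGetD (PySem.List.pyGetD board i []) j "") with hcellF
  set A1 : List (List String) := (PySem.List.pyRange 0 (R : Int) 1).foldl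
      (fun acc i => (PySem.List.pyRange 0 (C : Int) 1).foldl
        (fun a2 j => pvBump a2 (i + j) (cellF i j)) acc) init
    with hA1def
  set A2 : List (List String) := (PySem.List.pyRange 0 (R : Int) 1).foldl
      (fun acc i => (PySem.List.pyRange 0 (C : Int) 1).foldl
        (fun a2 j => pvBump a2 (((R : Int) - 1 - i) + j) (cellF i j)) acc) init
    with hA2def
  have hsplit : (List.foldl
        (fun st i => List.foldl
          (fun st2 j => (pvBump st2.1 (i + j) (cellF i j),
                         pvBump st2.2 (j - i + (R : Int) - 1) (cellF i j)))
          st (PySem.List.pyRange 0 (C : Int) 1))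
        (init, init) (PySem.List.pyRange 0 (R : Int) 1)) = (A1, A2) := by
    have hfun : (fun (st : List (List String) × List (List String)) (i : Int) =>
        List.foldl (fun st2 j =>
          (pvBump st2.1 (i + j) (cellF i j), pvBump st2.2 (j - i + (R : Int) - 1) (cellF i j)))
          st (PySem.List.pyRange 0 (C : Int) 1))
        = (fun st i =>
            ((fun (acc : List (List String)) (i : Int) =>
                (PySem.List.pyRange 0 (C : Int) 1).foldl
                  (fun a2 j => pvBump a2 (i + j) (cellF i j)) acc) st.1 i,
             (fun (acc : List (List String)) (i : Int) =>
                (PySem.List.pyRange 0 (C : Int) 1).foldl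
                  (fun a2 j => pvBump a2 (((R : Int) - 1 - i) + j) (cellF i j)) acc) st.2 i)) := by
      funext st i
      obtain ⟨a, b⟩ := st
      have e1 : (fun (st2 : List (List String) × List (List String)) (j : Int) =>
          (pvBump st2.1 (i + j) (cellF i j), pvBump st2.2 (j - i + (R : Int) - 1) (cellF i j)))
          = (fun st2 j =>
              ((fun (a2 : List (List String)) (j : Int) => pvBump a2 (i + j) (cellF i j)) st2.1 j,
               (fun (a2 : List (List String)) (j : Int) =>
                  pvBump a2 (((R : Int) - 1 - i) + j) (cellF i j)) st2.2 j)) := by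
        funext st2 j
        show _ = (pvBump st2.1 (i + j) (cellF i j),
                  pvBump st2.2 (((R : Int) - 1 - i) + j) (cellF i j))
        congr 2
        ring
      rw [e1]
      exact PySem.List.foldl_prod_mk
        (fun (a2 : List (List String)) (j : Int) => pvBump a2 (i + j) (cellF i j))
        (fun (a2 : List (List String)) (j : Int) => pvBump a2 (((R : Int) - 1 - i) + j) (cellF i j))
        (PySem.List.pyRange 0 (C : Int) 1) a b
    rw [hfun]
    exact PySem.List.foldl_prod_mk
      (fun (acc : List (List String)) (i : Int) =>
        (PySem.List.pyRange 0 (C : Int) 1).foldl (fun a2 j => pvBump a2 (i + j) (cellF i j)) acc)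
      (fun (acc : List (List String)) (i : Int) =>
        (PySem.List.pyRange 0 (C : Int) 1).foldl
          (fun a2 j => pvBump a2 (((R : Int) - 1 - i) + j) (cellF i j)) acc)
      (PySem.List.pyRange 0 (R : Int) 1) init init
  rw [hsplit]
  have hlenA1 : A1.length = N := by
    have h := pvBoard_length (fun i => i) cellF (C : Int) 0 (R : Int) init
    rw [hA1def]
    exact h.trans hinitlen
  have hlenA2 : A2.length = N := by
    have h := pvBoard_length (fun i => (R : Int) - 1 - i) cellF (C : Int) 0 (R : Int) init
    rw [hA2def]
    exact h.trans hinitlen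
  have hinA : ∀ i : Int, 0 ≤ i → i < (R : Int) → ∀ j : Int, 0 ≤ j → j < (C : Int) →
      0 ≤ i + j ∧ i + j < init.length := by
    intro i h1 h2 j h3 h4
    rw [hinitlen]
    omega
  have hinM : ∀ i : Int, 0 ≤ i → i < (R : Int) → ∀ j : Int, 0 ≤ j → j < (C : Int) →
      0 ≤ ((R : Int) - 1 - i) + j ∧ ((R : Int) - 1 - i) + j < init.length := by
    intro i h1 h2 j h3 h4
    rw [hinitlen]
    omega
  have hA1rev : A1.reverse
      = (PySem.List.pyRange (-(R : Int) + 1) C 1).map (fun o => pvDiag board R C o false) := by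
    apply List.ext_getElem
    · simp [hlenA1, PySem.List.length_pyRange_one]
      omega
    · intro m h1 h2
      rw [List.getElem_reverse, List.getElem_map, PySem.List.getElem_pyRange_one]
      have hmN : m < N := by
        have := h1; rw [List.length_reverse, hlenA1] at this; exact this
      have htN : A1.length - 1 - m < A1.length := by omega
      rw [← List.getD_eq_getElem A1 [] htN]
      have hbucket := pvBoard_getD (fun i => i) cellF (C : Int) 0 (R : Int) init hinA
        (A1.length - 1 - m) (by rw [hinitlen]; omega)
      dsimp only at hbucket
      rw [← hA1def] at hbucket
      rw [hbucket, hinitget, List.nil_append, hcellF, anti_bucket board R C]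
      congr 1
      rw [hlenA1]
      omega
  have hA2eq : A2
      = (PySem.List.pyRange (-(R : Int) + 1) C 1).map (fun o => pvDiag board R C o true) := by
    apply List.ext_getElem
    · simp [hlenA2, PySem.List.length_pyRange_one]
      omega
    · intro m h1 h2
      rw [List.getElem_map, PySem.List.getElem_pyRange_one]
      have hmN : m < N := by rw [hlenA2] at h1; exact h1
      rw [← List.getD_eq_getElem A2 [] h1]
      have hbucket := pvBoard_getD (fun i => (R : Int) - 1 - i) cellF (C : Int) 0 (R : Int) init
        hinM m (by rw [hinitlen]; omega)
      dsimp only at hbucket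
      rw [← hA2def] at hbucket
      rw [hbucket, hinitget, List.nil_append, hcellF, main_bucket board R C]
      congr 1
      omega
  congr 1
  congr 1
  · -- forward diagonals
    rw [hA1rev, List.filter_map]
    have hfold := PySem.List.foldl_append_if
      (p := fun o => decide (k ≤ ((pvDiag board (R : Int) (C : Int) o false).length : Int)))
      (f := fun o => pvDiag board (R : Int) (C : Int) o false)
      (l := PySem.List.pyRange (-(R : Int) + 1) C 1) (acc := ([] : List (List String)))
    simp only [decide_eq_true_eq] at hfold
    unfold pvGetDiagonals
    rw [hfold, List.nil_append]
    rfl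
  · -- main diagonals
    rw [hA2eq, List.filter_map]
    have hfold := PySem.List.foldl_append_if
      (p := fun o => decide (k ≤ ((pvDiag board (R : Int) (C : Int) o true).length : Int)))
      (f := fun o => pvDiag board (R : Int) (C : Int) o true)
      (l := PySem.List.pyRange (-(R : Int) + 1) C 1) (acc := ([] : List (List String)))
    simp only [decide_eq_true_eq] at hfold
    unfold pvGetDiagonals
    rw [hfold, List.nil_append]
    rfl
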